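-- pv_equiv track=rewrite | github.com/na2099/Data-Analyzer | T009_P2_add_remove_search_dataset.py | get_movies_by_cast
-- ===== SOURCE A (Python) =====
-- def get_movies_by_cast (movie_dictionary: dict, actor: str) -> int:
--     """
--     >>> get_movies_by_cast (netflix_movies, Sarah Troyer)
--     The actor Sarah Troyer has acted in the following movies:
--     Movie 1: "Hometown Holiday" by "Justin G. Dyck"
--     >>> get_movies_by_cast (netflix_movies, Morgan Neundorf)
--     The actor Morgan Neundorf has acted in the following movies:
--     Movie 1: "A Witches' Ball" by "Justin G. Dyck"
--     >>> get_movies_by_cast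
--     The actor Laurence Fishburne has acted in the following movies:
--     Movie 1: "The Ice Road" by "Jonathan Hensleigh"
--     Movie 2: "Standoff" by "Adam Alleca"
--     """
--     count = 0
--     movie_titles = []
--     print ("The actor", actor, "has acted in the following movies:")
--     for movie_list in movie_dictionary.values():
--         for movie in movie_list:
--             if actor in movie["cast"]:
--                 if movie['title'] not in movie_titles:
--                     count += 1
--                     print ("Movie", str(count)+":", '"'+ movie["title"]+ '"', "by", '"' + movie["director"]+'"')
--                     movie_titles.append(movie['title'])
--
--     return count
-- ===== SOURCE B (Python) =====
-- def get_movies_by_cast(movie_dictionary: dict, actor: str) -> int: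
--     print("The actor", actor, "has acted in the following movies:")
--     flat = [movie for movie_list in movie_dictionary.values() for movie in movie_list]
--     matches = [(movie["title"], i) for i, movie in enumerate(flat) if actor in movie["cast"]]
--     matches.sort(key=lambda pair: pair[0])      # stable: first occurrence leads its title group
--     firsts = []
--     prev = None
--     for title, i in matches:
--         if title != prev:
--             firsts.append(i)
--         prev = title
--     firsts.sort()                               # back to original (first-occurrence) order
--     n = 0
--     for i in firsts:
--         movie = flat[i]
--         n += 1
--         print("Movie", str(n) + ":", '"' + movie["title"] + '"', "by", '"' + movie["director"] + '"')
--     return n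
-- ===== Notes on version B (the rewrite author's own statement) =====
-- stated objective: alternative
-- what changed: B replaces A's seen-list deduplication loop by sort-based deduplication: it decorates each matching movie with its flat position, stable-sorts by title so equal titles become adjacent, keeps the first index of each adjacent title group, and resorts those indices to restore first-occurrence order for printing; the count is the number of kept indices.
import Mathlib
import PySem

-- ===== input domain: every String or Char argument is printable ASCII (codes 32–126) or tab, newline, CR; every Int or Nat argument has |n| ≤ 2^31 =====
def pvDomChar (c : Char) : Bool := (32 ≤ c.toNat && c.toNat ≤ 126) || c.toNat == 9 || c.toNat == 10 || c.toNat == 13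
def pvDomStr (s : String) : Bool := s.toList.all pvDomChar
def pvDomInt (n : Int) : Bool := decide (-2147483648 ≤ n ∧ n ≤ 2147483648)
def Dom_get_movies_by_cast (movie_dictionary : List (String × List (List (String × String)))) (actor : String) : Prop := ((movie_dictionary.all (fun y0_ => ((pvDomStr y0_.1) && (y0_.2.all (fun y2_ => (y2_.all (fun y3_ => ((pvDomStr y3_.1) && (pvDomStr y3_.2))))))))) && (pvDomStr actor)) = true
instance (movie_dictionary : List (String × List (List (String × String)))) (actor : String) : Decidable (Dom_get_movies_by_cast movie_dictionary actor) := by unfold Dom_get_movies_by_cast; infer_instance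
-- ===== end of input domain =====

-- B replaces A's seen-list dedup loop by sort-based deduplication: decorate matched with their
-- flat index, stable-sort by title, keep the first of each adjacent title group, resort by index
-- (alternative algorithm, same return value). Both print; the equivalence proved is about the
-- RETURN value only (B's printed output was checked identical to A's where A returns).

-- shared accessor: movie["key"] (Python dict lookup; "" stands for the KeyError case, excluded by Pre_)
def pvField (m : List (String × String)) (k : String) : String :=
  (PySem.Dict.get? (PySem.Dict.mk m) k).getD ""

-- ===== PORT A =====
def get_movies_by_cast (movie_dictionary : List (String × List (List (String × String)))) (actor : String) : Int :=
  (movie_dictionary.foldl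
    (fun (st : Int × List String) kv =>
      kv.2.foldl
        (fun (st : Int × List String) movie =>
          if PySem.Str.isIn actor (pvField movie "cast") then
            if pvField movie "title" ∉ st.2 then
              (st.1 + 1, st.2 ++ [pvField movie "title"])
            else st
          else st)
        st)
    (0, [])).1

-- ===== PORT B =====
def get_movies_by_cast_alt (movie_dictionary : List (String × List (List (String × String)))) (actor : String) : Int :=
  let flat := movie_dictionary.flatMap (·.2)
  let matched := (PySem.List.enumerate flat).filterMap
    (fun p => if PySem.Str.isIn actor (pvField p.2 "cast") then some (pvField p.2 "title", p.1) else none)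
  let sortedm := PySem.List.sorted matched (fun pair => pair.1) false
  let scanned := sortedm.foldl
    (fun (st : List Int × Option String) ti =>
      (if some ti.1 ≠ st.2 then st.1 ++ [ti.2] else st.1, some ti.1))
    ([], none)
  let firsts := PySem.List.sorted scanned.1 (fun i => i) false
  firsts.foldl (fun (n : Int) _ => n + 1) 0

-- ===== PRECONDITION & SPEC =====
-- Pre_ excludes exactly the inputs where the Python A raises KeyError: a movie without "cast", a
-- matching movie without "title", or a first-occurrence matching movie (no earlier match shares its
-- title) without "director".  (A duplicate-title match may lack "director": A returns there and so does B.)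
def Pre_get_movies_by_cast (movie_dictionary : List (String × List (List (String × String)))) (actor : String) : Prop :=
  let flat := movie_dictionary.flatMap (·.2)
  (∀ m ∈ flat, (PySem.Dict.mk m).contains "cast" = true ∧
     (PySem.Str.isIn actor (pvField m "cast") = true → (PySem.Dict.mk m).contains "title" = true)) ∧
  (∀ i, i < flat.length →
     PySem.Str.isIn actor (pvField (flat.getD i []) "cast") = true →
     (∀ j, j < i → ¬ (PySem.Str.isIn actor (pvField (flat.getD j []) "cast") = true ∧
                      pvField (flat.getD j []) "title" = pvField (flat.getD i []) "title")) →
     (PySem.Dict.mk (flat.getD i [])).contains "director" = true)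
instance (movie_dictionary : List (String × List (List (String × String)))) (actor : String) : Decidable (Pre_get_movies_by_cast movie_dictionary actor) := by unfold Pre_get_movies_by_cast; infer_instance

def pvWitness_get_movies_by_cast : (List (String × List (List (String × String)))) × String :=
  ([("g", [[("cast", "x y"), ("title", "t"), ("director", "d")]])], "x")

def Spec_get_movies_by_cast (movie_dictionary : List (String × List (List (String × String)))) (actor : String) (out : Int) : Prop := out = get_movies_by_cast_alt movie_dictionary actor
instance (movie_dictionary : List (String × List (List (String × String)))) (actor : String) (out : Int) : Decidable (Spec_get_movies_by_cast movie_dictionary actor out) := by unfold Spec_get_movies_by_cast; infer_instance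

-- ===== CLAIM (what is proved, stated in full; the proofs are below) =====
def Claim_equal_get_movies_by_cast : Prop := ∀ (movie_dictionary : List (String × List (List (String × String)))) (actor : String), Dom_get_movies_by_cast movie_dictionary actor → Pre_get_movies_by_cast movie_dictionary actor → Spec_get_movies_by_cast movie_dictionary actor (get_movies_by_cast movie_dictionary actor)

-- ===== LEMMAS AND PROOFS =====

-- A's nested loop over the groups is the same fold over the flattened movie list.
theorem pv_foldl_nested {α β γ : Type} (f : α → β → α) :
    ∀ (l : List (γ × List β)) (init : α),
      l.foldl (fun st kv => kv.2.foldl f st) init = (l.flatMap (·.2)).foldl f init := by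
  intro l
  induction l with
  | nil => intro init; rfl
  | cons kv rest ih =>
    intro init
    simp [List.flatMap_cons, List.foldl_append, ih]

-- the last loop of B only counts: folding +1 adds the length
theorem pv_foldl_count : ∀ (l : List Int) (n : Int),
    l.foldl (fun (n : Int) _ => n + 1) n = n + l.length := by
  intro l
  induction l with
  | nil => intro n; simp
  | cons x t ih => intro n; simp [List.foldl_cons, ih]; ring

-- a Finset fact both counting lemmas use
theorem pv_card_insert_eq_erase {t : String} {s : Finset String} :
    Finset.card (insert t s) = (s.erase t).card + 1 := by
  by_cases h : t ∈ s
  · rw [Finset.insert_eq_self.mpr h]; exact (Finset.card_erase_add_one h).symm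
  · rw [Finset.erase_eq_of_notMem h, Finset.card_insert_of_notMem h]

-- A-side invariant: the running count over a flat movie list is the number of distinct
-- matched titles not yet in the seen list.
theorem pv_countA (actor : String) :
    ∀ (l : List (List (String × String))) (c : Int) (seen : List String),
      (l.foldl
        (fun (st : Int × List String) movie =>
          if PySem.Str.isIn actor (pvField movie "cast") then
            if pvField movie "title" ∉ st.2 then
              (st.1 + 1, st.2 ++ [pvField movie "title"])
            else st
          else st)
        (c, seen)).1
      = c + ((((l.filter (fun m => PySem.Str.isIn actor (pvField m "cast"))).map
                (fun m => pvField m "title")).toFinset) \ seen.toFinset).card := by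
  intro l
  induction l with
  | nil => intro c seen; simp
  | cons m rest ih =>
    intro c seen
    by_cases hm : PySem.Str.isIn actor (pvField m "cast") = true
    · by_cases ht : pvField m "title" ∈ seen
      · have htf : pvField m "title" ∈ seen.toFinset := by simpa using ht
        simp only [List.foldl_cons, List.filter_cons, hm, if_true, ht, not_true, ite_false,
          List.map_cons, List.toFinset_cons, Finset.insert_sdiff_of_mem _ htf]
        exact ih c seen
      · have htf : pvField m "title" ∉ seen.toFinset := by simpa using ht
        simp only [List.foldl_cons, List.filter_cons, hm, if_true, ht, not_false_iff,
          List.map_cons, List.toFinset_cons]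
        rw [ih (c + 1) (seen ++ [pvField m "title"])]
        have hsi : (seen ++ [pvField m "title"]).toFinset = insert (pvField m "title") seen.toFinset := by
          simp [List.toFinset_append]
        rw [hsi, Finset.sdiff_insert, Finset.insert_sdiff_of_notMem _ htf,
          pv_card_insert_eq_erase]
        push_cast
        ring
    · simp only [List.foldl_cons, List.filter_cons, hm]
      simp only [Bool.false_eq_true, ite_false]
      exact ih c seen

-- B-side: the titles of the decorated match list are the titles of the matched movies, in order.
theorem pv_matched_map (actor : String) :
    ∀ (flat : List (List (String × String))) (s : Int),
      ((PySem.List.enumerate flat s).filterMap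
        (fun p => if PySem.Str.isIn actor (pvField p.2 "cast") then some (pvField p.2 "title", p.1) else none)).map
          (fun q => q.1)
      = (flat.filter (fun m => PySem.Str.isIn actor (pvField m "cast"))).map (fun m => pvField m "title") := by
  intro flat
  induction flat with
  | nil => intro s; simp [PySem.List.enumerate_nil]
  | cons m rest ih =>
    intro s
    rw [PySem.List.enumerate_cons, List.filterMap_cons, List.filter_cons]
    by_cases hm : PySem.Str.isIn actor (pvField m "cast") = true
    · simp only [hm, reduceIte, List.map_cons]
      rw [ih]
    · simp only [Bool.not_eq_true] at hm
      simp only [hm, Bool.false_eq_true, reduceIte]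
      exact ih (s + 1)

-- B-side invariant: on a list sorted by title, the adjacent-new-title scan collects one index
-- per distinct title not equal to the previous one.
theorem pv_scan :
    ∀ (l : List (String × Int)) (acc : List Int) (prev : Option String),
      l.Pairwise (fun a b => a.1 ≤ b.1) →
      (∀ t, prev = some t → ∀ x ∈ l, t ≤ x.1) →
      ((l.foldl
        (fun (st : List Int × Option String) ti =>
          (if some ti.1 ≠ st.2 then st.1 ++ [ti.2] else st.1, some ti.1)) (acc, prev)).1).length
      = acc.length + (((l.map (fun q => q.1)).toFinset) \ prev.toFinset).card := by
  intro l
  induction l with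
  | nil => intro acc prev _ _; simp
  | cons x rest ih =>
    intro acc prev hpw hprev
    have hall : ∀ y ∈ rest, x.1 ≤ y.1 := by
      intro y hy; exact (List.pairwise_cons.mp hpw).1 y hy
    have hpwr : rest.Pairwise (fun a b => a.1 ≤ b.1) := (List.pairwise_cons.mp hpw).2
    by_cases hps : some x.1 ≠ prev
    · rw [List.foldl_cons, if_pos hps]
      simp only [List.map_cons, List.toFinset_cons]
      rw [ih (acc ++ [x.2]) (some x.1) hpwr
        (by intro t ht y hy; cases ht; exact hall y hy)]
      have hdisj : insert x.1 (rest.map (fun q => q.1)).toFinset \ prev.toFinset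
          = insert x.1 (rest.map (fun q => q.1)).toFinset := by
        cases prev with
        | none => simp
        | some t =>
          have hts : t ≤ x.1 := hprev t rfl x (by simp)
          have htne : t ≠ x.1 := by
            intro h; exact hps (by rw [h])
          have : t ∉ insert x.1 (rest.map (fun q => q.1)).toFinset := by
            simp only [Finset.mem_insert, List.mem_toFinset, List.mem_map, not_or]
            refine ⟨htne, ?_⟩
            rintro ⟨y, hy, hyt⟩
            have := hall y hy
            rw [hyt] at this
            exact htne (le_antisymm hts this)
          simp [Option.toFinset, Finset.sdiff_singleton_eq_erase,
            Finset.erase_eq_of_notMem this]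
      rw [hdisj, pv_card_insert_eq_erase, ← Finset.sdiff_singleton_eq_erase]
      simp only [Option.toFinset_some] at *
      simp [List.length_append]
      ring
    · rw [not_ne_iff] at hps
      subst hps
      rw [List.foldl_cons, if_neg (by simp)]
      rw [ih acc (some x.1) hpwr (by intro t ht y hy; cases ht; exact hall y hy)]
      simp only [List.map_cons, List.toFinset_cons]
      have : (x.1 : String) ∈ (some x.1 : Option String).toFinset := by simp
      rw [Finset.insert_sdiff_of_mem _ this]

-- ===== VERDICT (by name: the statement is the Claim_ definition above) =====
theorem get_movies_by_cast_spec : Claim_equal_get_movies_by_cast := by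
  intro d actor _ _
  unfold Spec_get_movies_by_cast get_movies_by_cast get_movies_by_cast_alt
  have hpw : (PySem.List.sorted
      ((PySem.List.enumerate (d.flatMap (·.2)) 0).filterMap
        (fun p => if PySem.Str.isIn actor (pvField p.2 "cast") then some (pvField p.2 "title", p.1) else none))
      (fun pair => pair.1) false).Pairwise (fun a b => a.1 ≤ b.1) := by
    simpa using PySem.List.sorted_pairwise
      ((PySem.List.enumerate (d.flatMap (·.2)) 0).filterMap
        (fun p => if PySem.Str.isIn actor (pvField p.2 "cast") then some (pvField p.2 "title", p.1) else none))
      (fun pair => pair.1)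
  rw [pv_foldl_nested, pv_countA]
  rw [pv_foldl_count, PySem.List.length_sorted]
  rw [pv_scan _ [] none hpw (by intro t ht; cases ht)]
  have hperm : (PySem.List.sorted
      ((PySem.List.enumerate (d.flatMap (·.2)) 0).filterMap
        (fun p => if PySem.Str.isIn actor (pvField p.2 "cast") then some (pvField p.2 "title", p.1) else none))
      (fun pair => pair.1) false).Perm
      ((PySem.List.enumerate (d.flatMap (·.2)) 0).filterMap
        (fun p => if PySem.Str.isIn actor (pvField p.2 "cast") then some (pvField p.2 "title", p.1) else none)) :=
    PySem.List.sorted_perm _ _ _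
  rw [List.toFinset_eq_of_perm _ _ (hperm.map (fun q => q.1))]
  rw [pv_matched_map]
  simp
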